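-- pv_equiv track=rewrite | github.com/joaovitorborges/Checkers_IA_Minimax | Player.py | Is_Open_Diagonal_Capture
-- ===== SOURCE A (Python) =====
-- def Only_Enemy_Between(between):
--     for i in range(len(between)):  # sets all to lower
--         between[i] = between[i].lower()
--
--     if (between.count('p') == 1 and between.count('b') == 0):
--         return True
--     return False
--
-- def Is_Open_Diagonal_Capture(X,Y,toX,toY,tabuleiro):   # returns if its possible to capture and in what direction
--     if (tabuleiro[toX][toY] == ' '):
--         if (X-toX == Y - toY) or (-1*(X-toX) == Y - toY):      # if its diagonal
--             if X < toX:
--                 if Y < toY:       # if its down-right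
--                     AX = toX-1
--                     AY = toY-1
--                     between = []
--                     while(AX != X and AY != Y):
--                         between.append(tabuleiro[AX][AY])
--                         AX -= 1
--                         AY -= 1
--
--                     if(Only_Enemy_Between(between)):
--                         return (True, -1, -1)
--
--                 elif Y > toY:     # if its down-left
--                     AX = toX - 1
--                     AY = toY + 1
--                     between = []
--                     while (AX != X and AY != Y):
--                         between.append(tabuleiro[AX][AY])
--                         AX -= 1
--                         AY += 1
--
--                     if(Only_Enemy_Between(between)):
--                         return (True, -1, +1)
--
--             elif X > toX:
--
--                 if Y < toY:       # if its up-right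
--                     AX = toX + 1
--                     AY = toY - 1
--                     between = []
--                     while (AX != X and AY != Y):
--                         between.append(tabuleiro[AX][AY])
--                         AX += 1
--                         AY -= 1
--
--                     if(Only_Enemy_Between(between)):
--                         return (True,+1,-1)
--
--                 elif Y > toY:     # if its up-left
--                     AX = toX + 1
--                     AY = toY + 1
--                     between = []
--                     while (AX != X and AY != Y):
--                         between.append(tabuleiro[AX][AY])
--                         AX += 1
--                         AY += 1
--
--                     if (Only_Enemy_Between(between)):
--                         return (True,+1,+1)
--
--     return (False,0,0)
-- ===== SOURCE B (Python) =====
-- def _sign(d):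
--     return (d > 0) - (d < 0)
--
-- def _scan(tabuleiro, x, y, X, Y, sx, sy, seen):
--     # recursive walk from (x,y) toward (X,Y) along (sx,sy); True iff exactly one
--     # enemy ('p'/'P') and no friend ('b'/'B') strictly between; short-circuits on
--     # a friend or a second enemy
--     if x == X or y == Y:
--         return seen
--     c = tabuleiro[x][y].lower()
--     if c == 'b' or (c == 'p' and seen):
--         return False
--     return _scan(tabuleiro, x + sx, y + sy, X, Y, sx, sy, seen or c == 'p')
--
-- def Is_Open_Diagonal_Capture(X, Y, toX, toY, tabuleiro):
--     if tabuleiro[toX][toY] != ' ':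
--         return (False, 0, 0)
--     sx = _sign(X - toX)
--     sy = _sign(Y - toY)
--     if sx == 0 or sy == 0 or abs(X - toX) != abs(Y - toY):
--         return (False, 0, 0)
--     if _scan(tabuleiro, toX + sx, toY + sy, X, Y, sx, sy, False):
--         return (True, sx, sy)
--     return (False, 0, 0)
-- ===== Notes on version B (the rewrite author's own statement) =====
-- stated objective: simpler
-- what changed: Replaces the four copy-pasted direction-specific while-loop branches, the intermediate list and the mutating two-pass counting helper by a sign-parameterised tail recursion that walks the diagonal once carrying a seen-enemy flag and short-circuits on a friend or a second enemy.
import Mathlib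
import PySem

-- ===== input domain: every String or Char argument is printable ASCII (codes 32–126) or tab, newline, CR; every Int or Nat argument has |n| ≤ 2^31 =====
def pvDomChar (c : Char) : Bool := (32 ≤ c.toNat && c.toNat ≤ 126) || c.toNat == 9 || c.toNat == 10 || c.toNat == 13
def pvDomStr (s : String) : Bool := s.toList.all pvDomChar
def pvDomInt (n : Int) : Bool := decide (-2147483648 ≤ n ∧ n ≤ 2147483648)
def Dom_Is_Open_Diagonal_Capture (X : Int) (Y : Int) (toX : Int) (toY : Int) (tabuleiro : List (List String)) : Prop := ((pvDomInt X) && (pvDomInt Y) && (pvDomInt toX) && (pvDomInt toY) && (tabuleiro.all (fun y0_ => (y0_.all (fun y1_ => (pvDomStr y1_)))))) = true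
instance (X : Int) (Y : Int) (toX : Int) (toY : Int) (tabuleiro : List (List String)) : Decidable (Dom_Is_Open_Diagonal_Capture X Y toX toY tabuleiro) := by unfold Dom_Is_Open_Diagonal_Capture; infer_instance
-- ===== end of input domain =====

-- B replaces A's four copy-pasted direction-specific while-loop branches (list building +
-- a two-pass counting helper that lowercases in place) by one sign-parameterised tail
-- recursion carrying a seen-enemy flag with early exit (objective: simpler).


-- ===== PORT A =====
-- tabuleiro[i][j]; the .getD "" default is only reached outside Pre_ (IndexError in Python)
def pvCell (tabuleiro : List (List String)) (i j : Int) : String :=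
  ((PySem.List.pyGet? tabuleiro i).bind (fun r => PySem.List.pyGet? r j)).getD ""

def Only_Enemy_Between (between : List String) : Bool :=
  -- the for-loop lowers every element in place; ported as a map producing the same list
  let b := between.map PySem.Str.lower
  (PySem.List.count b "p" == 1) && (PySem.List.count b "b" == 0)

-- the while-loop 'while AX != X and AY != Y: append tabuleiro[AX][AY]; AX += dX; AY += dY'.
-- fuel = |AX₀ - X| bounds the iteration count exactly: in every branch AX starts on X's side
-- of toX and moves one step toward X per pass, so the Python loop makes at most that many turns.
def pvWalkA (tabuleiro : List (List String)) (X Y dX dY : Int) : Nat → Int → Int → List String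
  | 0, _, _ => []
  | fuel + 1, AX, AY =>
    if AX ≠ X ∧ AY ≠ Y then
      pvCell tabuleiro AX AY :: pvWalkA tabuleiro X Y dX dY fuel (AX + dX) (AY + dY)
    else []

def Is_Open_Diagonal_Capture (X : Int) (Y : Int) (toX : Int) (toY : Int) (tabuleiro : List (List String)) : Bool × Int × Int :=
  if pvCell tabuleiro toX toY = " " then
    if (X - toX = Y - toY) ∨ ((-1) * (X - toX) = Y - toY) then
      if X < toX then
        if Y < toY then
          let between := pvWalkA tabuleiro X Y (-1) (-1) (toX - 1 - X).natAbs (toX - 1) (toY - 1)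
          if Only_Enemy_Between between then (true, -1, -1) else (false, 0, 0)
        else if Y > toY then
          let between := pvWalkA tabuleiro X Y (-1) 1 (toX - 1 - X).natAbs (toX - 1) (toY + 1)
          if Only_Enemy_Between between then (true, -1, 1) else (false, 0, 0)
        else (false, 0, 0)
      else if X > toX then
        if Y < toY then
          let between := pvWalkA tabuleiro X Y 1 (-1) (X - (toX + 1)).natAbs (toX + 1) (toY - 1)
          if Only_Enemy_Between between then (true, 1, -1) else (false, 0, 0)
        else if Y > toY then
          let between := pvWalkA tabuleiro X Y 1 1 (X - (toX + 1)).natAbs (toX + 1) (toY + 1)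
          if Only_Enemy_Between between then (true, 1, 1) else (false, 0, 0)
        else (false, 0, 0)
      else (false, 0, 0)
    else (false, 0, 0)
  else (false, 0, 0)

-- ===== PORT B =====
-- (d > 0) - (d < 0)
def pvSign (d : Int) : Int := (if d > 0 then (1 : Int) else 0) - (if d < 0 then (1 : Int) else 0)

-- recursive walk from (x,y) toward (X,Y); fuel = |x₀ - X| bounds the recursion depth exactly
-- (x moves one step toward X per call and the recursion stops when x = X or y = Y)
def pvScanB (tabuleiro : List (List String)) (X Y sx sy : Int) : Nat → Int → Int → Bool → Bool
  | 0, _, _, seen => seen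
  | fuel + 1, x, y, seen =>
    if x = X ∨ y = Y then seen
    else
      let c := PySem.Str.lower (pvCell tabuleiro x y)
      if c = "b" ∨ (c = "p" ∧ seen = true) then false
      else pvScanB tabuleiro X Y sx sy fuel (x + sx) (y + sy) (seen || c == "p")

def Is_Open_Diagonal_Capture_alt (X : Int) (Y : Int) (toX : Int) (toY : Int) (tabuleiro : List (List String)) : Bool × Int × Int :=
  if pvCell tabuleiro toX toY ≠ " " then (false, 0, 0)
  else
    let sx := pvSign (X - toX)
    let sy := pvSign (Y - toY)
    if sx = 0 ∨ sy = 0 ∨ (X - toX).natAbs ≠ (Y - toY).natAbs then (false, 0, 0)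
    else if pvScanB tabuleiro X Y sx sy (X - (toX + sx)).natAbs (toX + sx) (toY + sy) false
    then (true, sx, sy) else (false, 0, 0)

-- ===== PRECONDITION & SPEC =====
-- Pre_ excludes exactly the inputs where the Python A raises IndexError: the landing square
-- lookup tabuleiro[toX][toY] must be in range, and — when the walk actually runs (blank landing
-- square, genuine diagonal, distinct rows) — every intermediate diagonal cell must be in range.
def Pre_Is_Open_Diagonal_Capture (X : Int) (Y : Int) (toX : Int) (toY : Int) (tabuleiro : List (List String)) : Prop :=
  ((PySem.List.pyGet? tabuleiro toX).bind (fun r => PySem.List.pyGet? r toY)).isSome ∧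
  (((PySem.List.pyGet? tabuleiro toX).bind (fun r => PySem.List.pyGet? r toY)) = some " " →
    (X - toX).natAbs = (Y - toY).natAbs → X - toX ≠ 0 →
    ∀ k ∈ PySem.List.pyRange 1 ((X - toX).natAbs : Int) 1,
      ((PySem.List.pyGet? tabuleiro (toX + k * (if X - toX > 0 then 1 else -1))).bind
        (fun r => PySem.List.pyGet? r (toY + k * (if Y - toY > 0 then 1 else -1)))).isSome)
instance (X : Int) (Y : Int) (toX : Int) (toY : Int) (tabuleiro : List (List String)) : Decidable (Pre_Is_Open_Diagonal_Capture X Y toX toY tabuleiro) := by unfold Pre_Is_Open_Diagonal_Capture; infer_instance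

def pvWitness_Is_Open_Diagonal_Capture : Int × Int × Int × Int × List (List String) :=
  (0, 0, 2, 2, [["p", " ", " "], [" ", "P", " "], [" ", " ", " "]])

def Spec_Is_Open_Diagonal_Capture (X : Int) (Y : Int) (toX : Int) (toY : Int) (tabuleiro : List (List String)) (out : Bool × Int × Int) : Prop := out = Is_Open_Diagonal_Capture_alt X Y toX toY tabuleiro
instance (X : Int) (Y : Int) (toX : Int) (toY : Int) (tabuleiro : List (List String)) (out : Bool × Int × Int) : Decidable (Spec_Is_Open_Diagonal_Capture X Y toX toY tabuleiro out) := by unfold Spec_Is_Open_Diagonal_Capture; infer_instance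

-- ===== CLAIM (what is proved, stated in full; the proofs are below) =====
def Claim_equal_Is_Open_Diagonal_Capture : Prop := ∀ (X : Int) (Y : Int) (toX : Int) (toY : Int) (tabuleiro : List (List String)), Dom_Is_Open_Diagonal_Capture X Y toX toY tabuleiro → Pre_Is_Open_Diagonal_Capture X Y toX toY tabuleiro → Spec_Is_Open_Diagonal_Capture X Y toX toY tabuleiro (Is_Open_Diagonal_Capture X Y toX toY tabuleiro)

-- ===== LEMMAS AND PROOFS =====

-- B's recursive flag-carrying scan computes exactly the count test A makes on its walked list
theorem scan_eq_walk (tabuleiro : List (List String)) (X Y sx sy : Int) :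
    ∀ (fuel : Nat) (x y : Int) (seen : Bool),
      pvScanB tabuleiro X Y sx sy fuel x y seen =
        ((PySem.List.count ((pvWalkA tabuleiro X Y sx sy fuel x y).map PySem.Str.lower) "p"
            + (if seen then 1 else 0) == 1)
          && (PySem.List.count ((pvWalkA tabuleiro X Y sx sy fuel x y).map PySem.Str.lower) "b" == 0)) := by
  intro fuel
  induction fuel with
  | zero =>
    intro x y seen
    cases seen <;> simp [pvScanB, pvWalkA, PySem.List.count]
  | succ fuel ih =>
    intro x y seen
    by_cases h : x = X ∨ y = Y
    · rw [pvScanB, pvWalkA]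
      rw [if_pos h, if_neg (show ¬(x ≠ X ∧ y ≠ Y) by tauto)]
      cases seen <;> simp [PySem.List.count]
    · have hw : x ≠ X ∧ y ≠ Y := by tauto
      rw [pvScanB, pvWalkA, if_neg h, if_pos hw]
      simp only [List.map_cons, PySem.List.count_eq, List.count_cons]
      by_cases hb : PySem.Str.lower (pvCell tabuleiro x y) = "b"
      · rw [if_pos (Or.inl hb)]
        simp [hb]
      · by_cases hp : PySem.Str.lower (pvCell tabuleiro x y) = "p"
        · cases seen with
          | true =>
            rw [if_pos (Or.inr ⟨hp, rfl⟩)]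
            simp [hp]
          | false =>
            rw [if_neg (by simp [hb])]
            rw [ih]
            simp [hp, PySem.List.count_eq]
        · rw [if_neg (by simp [hb, hp])]
          rw [ih]
          simp [hp, hb, PySem.List.count_eq]

theorem pvSign_neg {d : Int} (h : d < 0) : pvSign d = -1 := by
  simp [pvSign, h, not_lt.mpr (le_of_lt h)]

theorem pvSign_pos {d : Int} (h : 0 < d) : pvSign d = 1 := by
  simp [pvSign, h, not_lt.mpr (le_of_lt h)]

-- ===== VERDICT (by name: the statement is the Claim_ definition above) =====
theorem Is_Open_Diagonal_Capture_spec : Claim_equal_Is_Open_Diagonal_Capture := by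
  intro X Y toX toY tab _ _
  unfold Spec_Is_Open_Diagonal_Capture
  simp only [Is_Open_Diagonal_Capture, Is_Open_Diagonal_Capture_alt]
  by_cases hc : pvCell tab toX toY = " "
  · rw [if_pos hc, if_neg (show ¬(pvCell tab toX toY ≠ " ") from not_not_intro hc)]
    by_cases hd : (X - toX = Y - toY) ∨ ((-1) * (X - toX) = Y - toY)
    · rw [if_pos hd]
      have habs : (X - toX).natAbs = (Y - toY).natAbs := by rcases hd with h | h <;> omega
      rcases lt_trichotomy X toX with hx | hx | hx
      · rw [if_pos hx]
        have hsx : pvSign (X - toX) = -1 := pvSign_neg (by omega)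
        rcases lt_trichotomy Y toY with hy | hy | hy
        · -- down-right: sx = sy = -1
          have hsy : pvSign (Y - toY) = -1 := pvSign_neg (by omega)
          rw [if_pos hy, hsx, hsy,
              if_neg (show ¬((-1:Int) = 0 ∨ (-1:Int) = 0 ∨ (X - toX).natAbs ≠ (Y - toY).natAbs) from by simp [habs]),
              scan_eq_walk,
              show toX + (-1:Int) = toX - 1 from by ring, show toY + (-1:Int) = toY - 1 from by ring,
              show (X - (toX - 1)).natAbs = (toX - 1 - X).natAbs from by omega]
          simp [Only_Enemy_Between]
        · exfalso; omega
        · -- down-left: sx = -1, sy = 1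
          have hsy : pvSign (Y - toY) = 1 := pvSign_pos (by omega)
          rw [if_neg (show ¬(Y < toY) from by omega), if_pos hy, hsx, hsy,
              if_neg (show ¬((-1:Int) = 0 ∨ (1:Int) = 0 ∨ (X - toX).natAbs ≠ (Y - toY).natAbs) from by simp [habs]),
              scan_eq_walk,
              show toX + (-1:Int) = toX - 1 from by ring,
              show (X - (toX - 1)).natAbs = (toX - 1 - X).natAbs from by omega]
          simp [Only_Enemy_Between]
      · -- X = toX: the diagonal test forces dx = 0; A falls through, B's sx = 0 guard fires
        rw [if_neg (show ¬(X < toX) from by omega), if_neg (show ¬(X > toX) from by omega),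
            if_pos (Or.inl (show pvSign (X - toX) = 0 from by simp [pvSign, hx]))]
      · rw [if_neg (show ¬(X < toX) from by omega), if_pos hx]
        have hsx : pvSign (X - toX) = 1 := pvSign_pos (by omega)
        rcases lt_trichotomy Y toY with hy | hy | hy
        · -- up-right: sx = 1, sy = -1
          have hsy : pvSign (Y - toY) = -1 := pvSign_neg (by omega)
          rw [if_pos hy, hsx, hsy,
              if_neg (show ¬((1:Int) = 0 ∨ (-1:Int) = 0 ∨ (X - toX).natAbs ≠ (Y - toY).natAbs) from by simp [habs]),
              scan_eq_walk,
              show toY + (-1:Int) = toY - 1 from by ring]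
          simp [Only_Enemy_Between]
        · exfalso; omega
        · -- up-left: sx = 1, sy = 1
          have hsy : pvSign (Y - toY) = 1 := pvSign_pos (by omega)
          rw [if_neg (show ¬(Y < toY) from by omega), if_pos hy, hsx, hsy,
              if_neg (show ¬((1:Int) = 0 ∨ (1:Int) = 0 ∨ (X - toX).natAbs ≠ (Y - toY).natAbs) from by simp [habs]),
              scan_eq_walk]
          simp [Only_Enemy_Between]
    · -- not diagonal: B's natAbs guard fires (or a sign is 0)
      rw [if_neg hd]
      by_cases hz : X - toX = 0
      · rw [if_pos (Or.inl (show pvSign (X - toX) = 0 from by simp [pvSign, hz]))]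
      · have hne : (X - toX).natAbs ≠ (Y - toY).natAbs := by
          intro h
          rcases Int.natAbs_eq_natAbs_iff.mp h with h' | h' <;> exact hd (by omega)
        rw [if_pos (Or.inr (Or.inr hne))]
  · rw [if_neg hc, if_pos hc]
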